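-- pv_equiv track=rewrite | github.com/FennelDumplings/leetcode-maxed_out | algorithm/python/prob1501-2000/prob1702_medium_修改后的最大二进制字符串.py | maximumBinaryString
-- ===== SOURCE A (Python) =====
-- def maximumBinaryString(binary: str) -> str:
--     n = len(binary)
--     idx0 = []
--     for i in range(n):
--         if binary[i] == '0':
--             idx0.append(i)
--     idx0.reverse()
--     result = ['1'] * n
--     while len(idx0) > 1:
--         nxt = idx0[-1] + 1
--         idx0.pop()
--         idx0.pop()
--         idx0.append(nxt)
--     if len(idx0) > 0:
--         result[idx0[0]] = '0'
--     return ''.join(result)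
-- ===== SOURCE B (Python) =====
-- def maximumBinaryString(binary: str) -> str:
--     cnt = 0
--     first = -1
--     for i, c in enumerate(binary):
--         if c == '0':
--             cnt += 1
--             if first < 0:
--                 first = i
--     res = ['1'] * len(binary)
--     if cnt:
--         res[first + cnt - 1] = '0'
--     return ''.join(res)
-- ===== Notes on version B (the rewrite author's own statement) =====
-- stated objective: simpler
-- what changed: B replaces A's collect-all-zero-indices, reverse, and pairwise merge-loop simulation with a single counting pass (number of zeros and first zero position) that places the lone zero directly at first+count-1.
import Mathlib
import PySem

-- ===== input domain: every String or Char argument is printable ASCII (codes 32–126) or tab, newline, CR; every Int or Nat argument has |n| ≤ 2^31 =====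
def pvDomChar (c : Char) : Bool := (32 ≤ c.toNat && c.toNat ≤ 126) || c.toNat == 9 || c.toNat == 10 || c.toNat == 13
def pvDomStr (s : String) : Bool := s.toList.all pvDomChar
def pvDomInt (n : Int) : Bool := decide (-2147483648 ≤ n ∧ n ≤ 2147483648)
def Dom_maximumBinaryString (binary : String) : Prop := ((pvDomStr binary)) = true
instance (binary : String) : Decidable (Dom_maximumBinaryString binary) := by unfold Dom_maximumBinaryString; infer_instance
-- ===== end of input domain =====

-- B replaces A's collect-reverse-merge simulation by a single counting pass that places the lone zero directly (objective: simpler).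

-- ===== PORT A =====
-- the while-loop of A: while len(idx0) > 1: nxt = idx0[-1]+1; idx0.pop(); idx0.pop(); idx0.append(nxt)
def pvMergeLoop (xs : List Int) : List Int :=
  if xs.length > 1 then
    pvMergeLoop (xs.dropLast.dropLast ++ [xs.getLastD 0 + 1])
  else xs
termination_by xs.length
decreasing_by simp [List.length_dropLast]; omega

def maximumBinaryString (binary : String) : String :=
  let n := binary.toList.length
  let idx0 := (PySem.List.pyRange 0 (n : Int)).foldl
      (fun acc i => if (PySem.Str.pyGet? binary i).getD ' ' == '0' then acc ++ [i] else acc) []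
  let m := pvMergeLoop idx0.reverse
  let result := List.replicate n '1'
  let result := if m.length > 0 then PySem.List.pySetD result (m.headD 0) '0' else result
  String.ofList result

-- ===== PORT B =====
def maximumBinaryString_alt (binary : String) : String :=
  let st := (PySem.List.enumerate binary.toList).foldl
      (fun (st : Int × Int) ic =>
        if ic.2 == '0' then (st.1 + 1, if st.2 < 0 then ic.1 else st.2) else st) (0, -1)
  let res := List.replicate binary.toList.length '1'
  let res := if st.1 ≠ 0 then PySem.List.pySetD res (st.2 + st.1 - 1) '0' else res
  String.ofList res

-- ===== PRECONDITION & SPEC =====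
def Spec_maximumBinaryString (binary : String) (out : String) : Prop := out = maximumBinaryString_alt binary
instance (binary : String) (out : String) : Decidable (Spec_maximumBinaryString binary out) := by unfold Spec_maximumBinaryString; infer_instance

-- ===== CLAIM (what is proved, stated in full; the proofs are below) =====
def Claim_equal_maximumBinaryString : Prop := ∀ (binary : String), Dom_maximumBinaryString binary → Spec_maximumBinaryString binary (maximumBinaryString binary)

-- ===== LEMMAS AND PROOFS =====

-- the (increasing) list of positions of '0' in l, starting at offset k
def pvZ : List Char → Int → List Int
  | [], _ => []
  | c :: t, k => if c = '0' then k :: pvZ t (k + 1) else pvZ t (k + 1)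

theorem pvMergeLoop_spec (xs : List Int) (h : xs ≠ []) :
    pvMergeLoop xs = [xs.getLastD 0 + ((xs.length - 1 : Nat) : Int)] := by
  fun_induction pvMergeLoop xs with
  | case1 xs hlen ih =>
      rw [ih (by simp)]
      obtain ⟨ys, a, b, rfl⟩ : ∃ ys a b, xs = ys ++ [a, b] := by
        rcases xs.eq_nil_or_concat with rfl | ⟨zs, b, rfl⟩
        · simp at hlen
        · rcases zs.eq_nil_or_concat with rfl | ⟨ys, a, rfl⟩
          · simp at hlen
          · exact ⟨ys, a, b, by simp⟩
      have e1 : (ys ++ [a, b]).dropLast.dropLast = ys := by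
        rw [show ys ++ [a, b] = (ys ++ [a]) ++ [b] by simp, List.dropLast_concat,
          List.dropLast_concat]
      have e2 : (ys ++ [a, b]).getLastD 0 = b := by
        simp [List.getLastD_eq_getLast?]
      rw [e1, e2]
      congr 1
      simp [List.length_append]
      omega
  | case2 xs hlen =>
      rcases xs with _ | ⟨a, t⟩
      · exact absurd rfl h
      · rcases t with _ | ⟨b, t⟩
        · simp
        · exact absurd (by simp) hlen

theorem pvFoldA (l : List Char) : ∀ (m k : Nat) (acc : List Int), m = l.length - k →
    (List.range' k m).foldl
      (fun (acc : List Int) (j : Nat) =>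
        if (l[j]?.getD ' ' == '0') then acc ++ [(j : Int)] else acc) acc
    = acc ++ pvZ (l.drop k) (k : Int) := by
  intro m
  induction m with
  | zero =>
      intro k acc hm
      have : l.drop k = [] := List.drop_eq_nil_of_le (by omega)
      simp [this, pvZ]
  | succ m ih =>
      intro k acc hm
      have hk : k < l.length := by omega
      have hdrop : l.drop k = l[k] :: l.drop (k + 1) := List.drop_eq_getElem_cons hk
      rw [List.range'_succ, List.foldl_cons, hdrop]
      have hget : l[k]? = some l[k] := List.getElem?_eq_getElem hk
      by_cases h0 : l[k] = '0'
      · rw [ih (k + 1) _ (by omega)] at *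
        simp only [hget, Option.getD_some, h0, beq_self_eq_true, if_true, pvZ]
        push_cast
        simp
      · have hbeq : (l[k] == '0') = false := beq_eq_false_iff_ne.mpr h0
        rw [ih (k + 1) _ (by omega)] at *
        simp only [hget, Option.getD_some, hbeq, Bool.false_eq_true, if_false, pvZ, if_neg h0]
        push_cast
        simp

theorem pvFoldB (l : List Char) : ∀ (k c f : Int), 0 ≤ k →
    (PySem.List.enumerate l k).foldl
      (fun (st : Int × Int) ic =>
        if ic.2 == '0' then (st.1 + 1, if st.2 < 0 then ic.1 else st.2) else st) (c, f)
    = (c + ((pvZ l k).length : Int), if f < 0 then (pvZ l k).headD f else f) := by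
  induction l with
  | nil =>
      intro k c f hk
      simp [PySem.List.enumerate, pvZ, ite_self]
  | cons ch t ih =>
      intro k c f hk
      have henum : PySem.List.enumerate (ch :: t) k = (k, ch) :: PySem.List.enumerate t (k + 1) := by
        simp [PySem.List.enumerate]
      rw [henum, List.foldl_cons]
      by_cases h0 : ch = '0'
      · subst h0
        simp only [beq_self_eq_true, if_true]
        rw [ih (k + 1) (c + 1) (if f < 0 then k else f) (by omega)]
        have hz : pvZ ('0' :: t) k = k :: pvZ t (k + 1) := by simp [pvZ]
        rw [hz]
        simp only [Prod.mk.injEq, List.length_cons, List.headD_cons]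
        refine ⟨by push_cast; ring, ?_⟩
        by_cases hf : f < 0
        · simp [hf, if_neg (by omega : ¬ k < 0)]
        · simp [hf]
      · have hbeq : (ch == '0') = false := beq_eq_false_iff_ne.mpr h0
        simp only [hbeq, Bool.false_eq_true, if_false]
        rw [ih (k + 1) c f (by omega)]
        simp [pvZ, if_neg h0]

theorem pvZ_head (t : List Int) (z : Int) : (z :: t).reverse.getLastD 0 = z := by
  simp [List.getLastD_eq_getLast?, List.getLast?_reverse]

-- ===== VERDICT (by name: the statement is the Claim_ definition above) =====
theorem maximumBinaryString_spec : Claim_equal_maximumBinaryString := by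
  intro binary _
  show maximumBinaryString binary = maximumBinaryString_alt binary
  simp only [maximumBinaryString, maximumBinaryString_alt]
  rw [PySem.List.pyRange_zero_natCast, List.foldl_map]
  simp only [PySem.Str.pyGet?_natCast]
  have hA := pvFoldA binary.toList binary.toList.length 0 [] (by omega)
  rw [List.range_eq_range', hA]
  rw [pvFoldB binary.toList 0 0 (-1) le_rfl]
  simp only [List.drop_zero, List.nil_append, Int.natCast_zero]
  rcases hZ : pvZ binary.toList 0 with _ | ⟨z, t⟩
  · simp [pvMergeLoop]
  · rw [pvMergeLoop_spec _ (by simp), pvZ_head]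
    have hne : (0 : Int) + ((t.length + 1 : Nat) : Int) ≠ 0 := by push_cast; omega
    simp only [List.length_cons, List.length_reverse, List.headD_cons,
      if_pos (show (-1 : Int) < 0 by norm_num), if_pos hne]
    norm_num
    congr 2
    ring
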